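-- pv_equiv track=rewrite | github.com/jiwonjulietyoon/Python_Notes | Python/programmers/p3.py | solution
-- ===== SOURCE A (Python) =====
-- def solution(board, nums):
--     n = len(board)
--     for y in range(n):
--         for x in range(n):
--             if board[y][x] in nums:
--                 board[y][x] = 0
--     board_t = list(zip(*board))
--     sumlist = []
--     for y in range(n):
--         sumlist.append(sum(board[y][:]))
--         sumlist.append(sum(board_t[y][:]))
--     diag1, diag2 = 0, 0
--     for i in range(n):
--         diag1 += board[i][i]
--         diag2 += board[n-1-i][i]
--     sumlist.extend([diag1, diag2])
--     return sumlist.count(0)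
-- ===== SOURCE B (Python) =====
-- def solution(board, nums):
--     n = len(board)
--     ns = set(nums)
--     for row in board:
--         for x in range(n):
--             if row[x] in ns:
--                 row[x] = 0
--     zeros = 0
--     col = [0] * n
--     diag1 = diag2 = 0
--     for y in range(n):
--         if sum(board[y]) == 0:
--             zeros += 1
--         for x in range(n):
--             col[x] += board[y][x]
--         diag1 += board[y][y]
--         diag2 += board[n - 1 - y][y]
--     for c in col:
--         if c == 0:
--             zeros += 1
--     if diag1 == 0:
--         zeros += 1
--     if diag2 == 0:
--         zeros += 1
--     return zeros
-- ===== Notes on version B (the rewrite author's own statement) =====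
-- stated objective: alternative
-- what changed: Zeroing tests membership against a set instead of scanning nums per cell, and the transpose, materialised sumlist and final count() are replaced by one loop over rows that accumulates column sums and both diagonals and counts zero lines on the fly. Pre_ excludes boards with a row shorter than len(board), on which A raises IndexError (B raises too).
import Mathlib
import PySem

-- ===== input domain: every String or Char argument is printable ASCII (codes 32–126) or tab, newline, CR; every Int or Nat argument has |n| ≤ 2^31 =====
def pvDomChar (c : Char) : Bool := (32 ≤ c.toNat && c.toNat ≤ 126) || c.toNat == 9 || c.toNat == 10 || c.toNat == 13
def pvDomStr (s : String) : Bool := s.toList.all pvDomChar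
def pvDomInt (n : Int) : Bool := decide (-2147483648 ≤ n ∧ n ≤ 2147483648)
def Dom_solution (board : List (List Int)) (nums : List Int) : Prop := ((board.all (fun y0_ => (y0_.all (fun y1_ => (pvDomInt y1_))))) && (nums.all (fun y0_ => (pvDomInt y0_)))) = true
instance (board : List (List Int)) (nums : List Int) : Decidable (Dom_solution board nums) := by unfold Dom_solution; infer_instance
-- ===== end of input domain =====

-- B keeps the zeroing pass (set membership) but drops A's transpose, materialised sum list and
-- final count(): one loop over rows accumulates column sums and both diagonals and counts zero
-- lines on the fly. Both versions mutate `board` in place; the claim is about the return value.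

-- ===== PORT A =====
def solution (board : List (List Int)) (nums : List Int) : Int :=
  let n := board.length
  let b := (List.range n).foldl (fun b y =>
    (List.range n).foldl (fun b x =>
      if ((b.getD y []).getD x 0) ∈ nums
      then b.set y ((b.getD y []).set x 0) else b) b) board
  -- list(zip(*b)) ported by hand as the first (min row length) columns of b; exact here since
  -- the zip of a nonempty list of rows is exactly these columns and zip() of no rows is []
  let bt := (List.range (((b.map List.length).min?).getD 0)).map
              (fun j => b.map (fun r => r.getD j 0))
  let sumlist := (List.range n).foldl
      (fun acc y => acc ++ [(b.getD y []).sum, (bt.getD y []).sum]) []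
  let dd := (List.range n).foldl
      (fun (p : Int × Int) i => (p.1 + (b.getD i []).getD i 0,
                                 p.2 + (b.getD (n - 1 - i) []).getD i 0)) ((0 : Int), (0 : Int))
  let sumlist := sumlist ++ [dd.1, dd.2]
  ((sumlist.count 0 : Nat) : Int)

-- ===== PORT B =====
def solution_alt (board : List (List Int)) (nums : List Int) : Int :=
  let n := board.length
  let ns := PySem.Set.ofList nums
  let b := board.map (fun row =>
    (List.range n).foldl (fun r x => if r.getD x 0 ∈ ns then r.set x 0 else r) row)
  let st := (List.range n).foldl (fun (st : Int × List Int × Int × Int) y =>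
      let zeros := if (b.getD y []).sum = 0 then st.1 + 1 else st.1
      let col := (List.range n).foldl
          (fun c x => c.set x (c.getD x 0 + (b.getD y []).getD x 0)) st.2.1
      (zeros, col, st.2.2.1 + (b.getD y []).getD y 0,
       st.2.2.2 + (b.getD (n - 1 - y) []).getD y 0))
    ((0 : Int), List.replicate n (0 : Int), (0 : Int), (0 : Int))
  let zeros := st.2.1.foldl (fun z c => if c = 0 then z + 1 else z) st.1
  let zeros := if st.2.2.1 = 0 then zeros + 1 else zeros
  let zeros := if st.2.2.2 = 0 then zeros + 1 else zeros
  zeros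

-- ===== PRECONDITION & SPEC =====
-- Pre: every row has at least len(board) cells — exactly the inputs where A does not raise
-- (a shorter row gives IndexError in A's zeroing loop; B raises there too).
def Pre_solution (board : List (List Int)) (nums : List Int) : Prop :=
  ∀ r ∈ board, board.length ≤ r.length
instance (board : List (List Int)) (nums : List Int) : Decidable (Pre_solution board nums) := by
  unfold Pre_solution; infer_instance

def pvWitness_solution : List (List Int) × List Int := ([[1, 0], [0, 2]], [2])

def Spec_solution (board : List (List Int)) (nums : List Int) (out : Int) : Prop := out = solution_alt board nums
instance (board : List (List Int)) (nums : List Int) (out : Int) : Decidable (Spec_solution board nums out) := by unfold Spec_solution; infer_instance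

-- ===== CLAIM (what is proved, stated in full; the proofs are below) =====
def Claim_equal_solution : Prop := ∀ (board : List (List Int)) (nums : List Int), Dom_solution board nums → Pre_solution board nums → Spec_solution board nums (solution board nums)

-- ===== LEMMAS AND PROOFS =====

-- proof-side spec pieces
def zrowK (nums : List Int) (k : Nat) (row : List Int) : List Int :=
  (List.range row.length).map (fun x => if x < k ∧ row.getD x 0 ∈ nums then 0 else row.getD x 0)
def indF (z : Int) : Int := if z = 0 then 1 else 0

-- generic list mini-lemmas
theorem pv_set_getD_self {α : Type} (l : List α) (y : Nat) (d : α) (h : y < l.length) :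
    l.set y (l.getD y d) = l := by
  apply List.ext_getElem
  · simp
  · intro i h1 h2
    simp only [List.getElem_set]
    split
    · next hiy => subst hiy; simp [List.getD, List.getElem?_eq_getElem h]
    · rfl
theorem pv_getD_set_self {α : Type} (l : List α) (y : Nat) (v d : α) (h : y < l.length) :
    (l.set y v).getD y d = v := by
  rw [List.getD_eq_getElem _ d (by simpa using h)]
  simp [List.getElem_set]
theorem pv_set_of_le {α : Type} (l : List α) (k : Nat) (v : α) (h : l.length ≤ k) :
    l.set k v = l := by
  apply List.ext_getElem
  · simp
  · intro i h1 h2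
    simp [List.getElem_set]
    intro hk; omega
theorem pv_getD_range_map {β : Type} (n : Nat) (f : Nat → β) (y : Nat) (d : β) (h : y < n) :
    ((List.range n).map f).getD y d = f y := by
  rw [List.getD_eq_getElem _ d (by simpa using h)]
  simp
theorem pv_range_map_getD_self {α : Type} (l : List α) (d : α) :
    (List.range l.length).map (fun i => l.getD i d) = l := by
  apply List.ext_getElem
  · simp
  · intro i h1 h2
    simp [List.getD, List.getElem?_eq_getElem h2]
theorem pv_map_eq_range_map {α β : Type} (l : List α) (f : α → β) (d : α) :
    l.map f = (List.range l.length).map (fun i => f (l.getD i d)) := by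
  conv_lhs => rw [← pv_range_map_getD_self l d]
  rw [List.map_map]
  rfl
theorem pv_sum_map_add {α : Type} (l : List α) (f g : α → Int) :
    (l.map (fun x => f x + g x)).sum = (l.map f).sum + (l.map g).sum := by
  induction l with
  | nil => simp
  | cons a l ih => simp [ih]; ring
theorem pv_sum_flatMap {α : Type} (l : List α) (g : α → List Int) :
    (l.flatMap g).sum = (l.map (fun a => (g a).sum)).sum := by
  induction l with
  | nil => simp
  | cons a l ih => simp [List.flatMap_cons, List.sum_append, ih]
theorem pv_count_eq_sum_ind (l : List Int) : ((l.count 0 : Nat) : Int) = (l.map indF).sum := by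
  induction l with
  | nil => simp
  | cons a l ih =>
      rw [List.count_cons]
      push_cast
      rw [ih]
      simp [indF, beq_iff_eq]
      by_cases h : a = 0 <;> simp [h] <;> ring
theorem pv_foldl_pair_add (xs : List Nat) (f h : Nat → Int) (p : Int × Int) :
    xs.foldl (fun p i => (p.1 + f i, p.2 + h i)) p
      = (p.1 + (xs.map f).sum, p.2 + (xs.map h).sum) := by
  induction xs generalizing p with
  | nil => simp
  | cons a xs ih => simp [ih]; constructor <;> ring
theorem pv_foldl_ind (l : List Int) (a : Int) :
    l.foldl (fun z c => if c = 0 then z + 1 else z) a = a + (l.map indF).sum := by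
  induction l generalizing a with
  | nil => simp
  | cons c l ih =>
      simp only [List.foldl_cons, List.map_cons, List.sum_cons, ih, indF]
      by_cases h : c = 0 <;> simp [h] <;> ring
theorem pv_if_ind (z d : Int) : (if d = 0 then z + 1 else z) = z + indF d := by
  by_cases h : d = 0 <;> simp [indF, h]
theorem pv_set_append_len {α : Type} (l1 : List α) (a v : α) (l2 : List α) :
    (l1 ++ a :: l2).set l1.length v = l1 ++ v :: l2 := by
  induction l1 with
  | nil => simp
  | cons x l1 ih => simp [ih]
theorem pv_getD_append_len {α : Type} (l1 : List α) (a d : α) (l2 : List α) :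
    (l1 ++ a :: l2).getD l1.length d = a := by
  induction l1 with
  | nil => simp [List.getD]
  | cons x l1 ih => simpa using ih

-- the zeroing row pass (shared shape of A's inner loop and B's per-row loop)
theorem length_zrowK (nums : List Int) (k : Nat) (row : List Int) :
    (zrowK nums k row).length = row.length := by
  simp [zrowK]

theorem pv_rowfold_eq (nums : List Int) (k : Nat) (row : List Int) :
    (List.range k).foldl (fun r x => if r.getD x 0 ∈ nums then r.set x 0 else r) row
      = zrowK nums k row := by
  induction k with
  | zero =>
      simp only [List.range_zero, List.foldl_nil, zrowK]
      rw [show (fun x => if x < 0 ∧ row.getD x 0 ∈ nums then 0 else row.getD x 0)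
            = (fun x => row.getD x 0) from by funext x; simp]
      exact (pv_range_map_getD_self row 0).symm
  | succ k ih =>
      rw [List.range_succ, List.foldl_append, ih, List.foldl_cons, List.foldl_nil]
      by_cases hk : k < row.length
      · have hget : (zrowK nums k row).getD k 0 = row.getD k 0 := by
          unfold zrowK
          rw [pv_getD_range_map _ _ _ _ hk]
          simp
        rw [hget]
        by_cases hm : row.getD k 0 ∈ nums
        · simp only [hm, if_true]
          apply List.ext_getElem
          · simp [zrowK]
          · intro i h1 h2
            have hlen : i < row.length := by simpa [zrowK] using h2
            simp only [zrowK, List.getElem_set, List.getElem_map, List.getElem_range]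
            by_cases hik : k = i
            · subst hik
              have hm' : row[k]?.getD 0 ∈ nums := hm
              simp [hm', Nat.lt_succ_self]
            · have : (i < k) = (i < k + 1) := by
                apply propext; constructor <;> intro <;> omega
              simp [hik, this]
        · simp only [hm, if_false]
          apply List.ext_getElem
          · simp [zrowK]
          · intro i h1 h2
            have hlen : i < row.length := by simpa [zrowK] using h1
            simp only [zrowK, List.getElem_map, List.getElem_range]
            by_cases hik : i = k
            · subst hik
              have hm' : row[i]?.getD 0 ∉ nums := hm
              simp [hm']
            · have : (i < k) = (i < k + 1) := by
                apply propext; constructor <;> intro <;> omega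
              simp [this]
      · have hlen : (zrowK nums k row).length ≤ k := by
          rw [length_zrowK]; omega
        have hget : (zrowK nums k row).getD k 0 = 0 :=
          List.getD_eq_default _ _ hlen
        rw [hget, pv_set_of_le _ _ _ hlen]
        have hzz : zrowK nums (k + 1) row = zrowK nums k row := by
          unfold zrowK
          apply List.map_congr_left
          intro x hx
          have hxr : x < row.length := List.mem_range.mp hx
          have : (x < k) = (x < k + 1) := by
            apply propext; constructor <;> intro <;> omega
          simp only [this]
        rw [hzz]
        split <;> rfl

-- A-side: the in-place zeroing double loop equals the row-wise map
theorem pv_innerfold_set (nums : List Int) (xs : List Nat) (b : List (List Int)) (y : Nat)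
    (hy : y < b.length) :
    xs.foldl (fun b x => if ((b.getD y []).getD x 0) ∈ nums
        then b.set y ((b.getD y []).set x 0) else b) b
      = b.set y (xs.foldl (fun r x => if r.getD x 0 ∈ nums then r.set x 0 else r) (b.getD y [])) := by
  induction xs generalizing b with
  | nil =>
      simp only [List.foldl_nil]
      exact (pv_set_getD_self b y [] hy).symm
  | cons x xs ih =>
      simp only [List.foldl_cons]
      by_cases hm : ((b.getD y []).getD x 0) ∈ nums
      · simp only [hm, if_true]
        rw [ih _ (by simpa using hy)]
        rw [pv_getD_set_self b y _ [] hy, List.set_set]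
      · simp only [hm, if_false]
        exact ih b hy

theorem pv_zerofold_eq (board : List (List Int)) (nums : List Int) :
    (List.range board.length).foldl (fun b y =>
      (List.range board.length).foldl (fun b x =>
        if ((b.getD y []).getD x 0) ∈ nums
        then b.set y ((b.getD y []).set x 0) else b) b) board
      = board.map (zrowK nums board.length) := by
  have aux : ∀ k, k ≤ board.length →
      (List.range k).foldl (fun b y =>
        (List.range board.length).foldl (fun b x =>
          if ((b.getD y []).getD x 0) ∈ nums
          then b.set y ((b.getD y []).set x 0) else b) b) board
      = (board.take k).map (zrowK nums board.length) ++ board.drop k := by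
    intro k
    induction k with
    | zero => intro _; simp
    | succ k ih =>
        intro hk
        have hkn : k < board.length := by omega
        rw [List.range_succ, List.foldl_append, ih (by omega), List.foldl_cons, List.foldl_nil]
        have hl1 : ((board.take k).map (zrowK nums board.length)).length = k := by
          simp; omega
        have hyB : k < ((board.take k).map (zrowK nums board.length) ++ board.drop k).length := by
          simp; omega
        rw [pv_innerfold_set nums _ _ k hyB]
        have hdrop : board.drop k = board[k] :: board.drop (k + 1) :=
          List.drop_eq_getElem_cons hkn
        have hgd := pv_getD_append_len ((board.take k).map (zrowK nums board.length))
          board[k] ([] : List Int) (board.drop (k + 1))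
        rw [hl1] at hgd
        rw [hdrop, hgd, pv_rowfold_eq]
        have hset := pv_set_append_len ((board.take k).map (zrowK nums board.length))
          board[k] (zrowK nums board.length board[k]) (board.drop (k + 1))
        rw [hl1] at hset
        rw [hset]
        have htake : List.take (k + 1) board = List.take k board ++ [board[k]] := by
          rw [List.take_add_one, List.getElem?_eq_getElem hkn]
          rfl
        rw [htake, List.map_append]
        simp
  have := aux board.length (le_refl _)
  simpa using this

-- B-side: the column-accumulation inner loop
theorem pv_colfold (row c0 : List Int) (k : Nat) (hk : k ≤ c0.length) :
    (List.range k).foldl (fun c x => c.set x (c.getD x 0 + row.getD x 0)) c0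
      = (List.range c0.length).map (fun j => c0.getD j 0 + if j < k then row.getD j 0 else 0) := by
  induction k with
  | zero =>
      simp only [List.range_zero, List.foldl_nil]
      have h2 : (List.range c0.length).map (fun j =>
          c0.getD j 0 + if j < 0 then row.getD j 0 else 0)
          = (List.range c0.length).map (fun j => c0.getD j 0) :=
        List.map_congr_left (fun j _ => by simp)
      rw [h2, pv_range_map_getD_self]
  | succ k ih =>
      have hkc : k < c0.length := by omega
      rw [List.range_succ, List.foldl_append, ih (by omega), List.foldl_cons, List.foldl_nil]
      have hgd : ((List.range c0.length).map (fun j =>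
          c0.getD j 0 + if j < k then row.getD j 0 else 0)).getD k 0 = c0.getD k 0 := by
        rw [pv_getD_range_map _ _ _ _ hkc]
        simp
      rw [hgd]
      apply List.ext_getElem
      · simp
      · intro i h1 h2
        have hic : i < c0.length := by simpa using h2
        simp only [List.getElem_set, List.getElem_map, List.getElem_range]
        by_cases hik : k = i
        · subst hik
          simp [Nat.lt_succ_self, Nat.lt_irrefl]
        · have hiff : (i < k) = (i < k + 1) := by
            apply propext; constructor <;> intro <;> omega
          simp [hik, hiff]

-- B-side: outer accumulation invariant over the zeroed board zb (zb.length = n)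
theorem pv_outerB (zb : List (List Int)) (n : Nat) (k : Nat) (hk : k ≤ n) :
    (List.range k).foldl (fun (st : Int × List Int × Int × Int) y =>
        let zeros := if (zb.getD y []).sum = 0 then st.1 + 1 else st.1
        let col := (List.range n).foldl
            (fun c x => c.set x (c.getD x 0 + (zb.getD y []).getD x 0)) st.2.1
        (zeros, col, st.2.2.1 + (zb.getD y []).getD y 0,
         st.2.2.2 + (zb.getD (n - 1 - y) []).getD y 0))
      ((0 : Int), List.replicate n (0 : Int), (0 : Int), (0 : Int))
    = (((List.range k).map (fun y => indF ((zb.getD y []).sum))).sum,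
       (List.range n).map (fun j =>
          ((List.range k).map (fun i => (zb.getD i []).getD j 0)).sum),
       ((List.range k).map (fun i => (zb.getD i []).getD i 0)).sum,
       ((List.range k).map (fun i => (zb.getD (n - 1 - i) []).getD i 0)).sum) := by
  induction k with
  | zero =>
      simp only [List.range_zero, List.foldl_nil, List.map_nil, List.sum_nil]
      have : (List.range n).map (fun j => (0 : Int)) = List.replicate n 0 := by
        simp [List.map_const']
      simp [this]
  | succ k ih =>
      rw [List.range_succ, List.foldl_append, ih (by omega), List.foldl_cons, List.foldl_nil]
      dsimp only
      have hlen : ((List.range n).map (fun j =>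
          ((List.range k).map (fun i => (zb.getD i []).getD j 0)).sum)).length = n := by simp
      rw [pv_colfold (zb.getD k []) _ n (by rw [hlen])]
      rw [hlen]
      simp only [Prod.mk.injEq]
      refine ⟨?_, ?_, ?_, ?_⟩
      · rw [pv_if_ind, List.map_append, List.sum_append]
        simp
      · apply List.map_congr_left
        intro j hj
        have hjn : j < n := List.mem_range.mp hj
        rw [pv_getD_range_map _ _ _ _ hjn, if_pos hjn]
        rw [List.map_append, List.sum_append]
        simp
      · rw [List.map_append, List.sum_append]
        simp
      · rw [List.map_append, List.sum_append]
        simp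

-- ===== VERDICT (by name: the statement is the Claim_ definition above) =====
theorem solution_spec : Claim_equal_solution := by
  intro board nums _ hpre
  unfold Spec_solution solution solution_alt
  simp only [PySem.Set.mem_ofList, pv_rowfold_eq]
  rw [pv_zerofold_eq board nums]
  rw [pv_outerB (board.map (zrowK nums board.length)) board.length board.length (le_refl _)]
  rw [PySem.List.foldl_append_eq_flatMap]
  rw [pv_foldl_pair_add]
  rw [pv_foldl_ind]
  rw [pv_if_ind, pv_if_ind]
  rw [pv_count_eq_sum_ind, List.map_append, List.sum_append]
  dsimp only
  have hzblen : (board.map (zrowK nums board.length)).length = board.length := by simp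
  -- every y < n is below the min row length used for the transpose
  have hm : ∀ y, y < board.length →
      y < (((board.map (zrowK nums board.length)).map List.length).min?.getD 0) := by
    intro y hy
    rw [List.map_map]
    rcases h : (board.map (List.length ∘ zrowK nums board.length)).min? with _ | m'
    · rw [List.min?_eq_none_iff] at h
      simp at h
      subst h
      simp at hy
    · have hmm := List.min?_mem h
      rcases List.mem_map.mp hmm with ⟨r, hr, hrl⟩
      have : board.length ≤ m' := by
        rw [← hrl]
        simp only [Function.comp, length_zrowK]
        exact hpre _ hr
      simp [h]
      omega
  rw [List.nil_append, List.map_flatMap, pv_sum_flatMap]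
  have hra : ∀ y ∈ List.range board.length,
      (List.map indF [((board.map (zrowK nums board.length)).getD y []).sum,
        ((List.map (fun j => List.map (fun r => r.getD j 0) (board.map (zrowK nums board.length)))
          (List.range (((board.map (zrowK nums board.length)).map List.length).min?.getD 0))).getD y []).sum]).sum
      = indF (((board.map (zrowK nums board.length)).getD y []).sum)
        + indF (((List.range board.length).map
            (fun i => ((board.map (zrowK nums board.length)).getD i []).getD y 0)).sum) := by
    intro y hy
    have hyn : y < board.length := List.mem_range.mp hy
    simp only [List.map_cons, List.map_nil, List.sum_cons, List.sum_nil, add_zero]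
    congr 2
    rw [pv_getD_range_map _ _ _ _ (hm y hyn)]
    rw [pv_map_eq_range_map (board.map (zrowK nums board.length)) (fun r => r.getD y 0)
        ([] : List Int), hzblen]
  rw [List.map_congr_left hra, pv_sum_map_add]
  simp only [List.map_cons, List.map_nil, List.sum_cons, List.sum_nil, add_zero, List.map_map,
    Function.comp_def]
  ring
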